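-- pv_equiv track=rewrite | github.com/enaulad511/MIQUOD_Multi | Python/Mixing_QMPD.py | maximum_striation_thickness
-- ===== SOURCE A (Python) =====
-- def maximum_striation_thickness(max_str_thick):
--     """
--
--     :rtype: list
--     :param max_str_thick: max str thickness
--     :return: store_max_str_thick
--     """
--     store_max_str_thick = []
--     i = 0
--     for List1 in max_str_thick:
--         store_max_str_thick.append([])
--         for item in List1:
--             store_max_str_thick[i] = item
--         i = i + 1
--     return store_max_str_thick
-- ===== SOURCE B (Python) =====
-- def maximum_striation_thickness(max_str_thick):
--     # Take each sublist's last element directly; no inner scan.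
--     return [L[-1] for L in max_str_thick]
-- ===== Notes on version B (the rewrite author's own statement) =====
-- stated objective: simpler
-- what changed: B replaces A's inner overwrite loop (which scans every element of each sublist only to keep the last assignment) by a single comprehension taking each sublist's last element with O(1) indexing.
-- outside the precondition, e.g. on maximum_striation_thickness([[]]): A returns [[]], B raises IndexError
import Mathlib
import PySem

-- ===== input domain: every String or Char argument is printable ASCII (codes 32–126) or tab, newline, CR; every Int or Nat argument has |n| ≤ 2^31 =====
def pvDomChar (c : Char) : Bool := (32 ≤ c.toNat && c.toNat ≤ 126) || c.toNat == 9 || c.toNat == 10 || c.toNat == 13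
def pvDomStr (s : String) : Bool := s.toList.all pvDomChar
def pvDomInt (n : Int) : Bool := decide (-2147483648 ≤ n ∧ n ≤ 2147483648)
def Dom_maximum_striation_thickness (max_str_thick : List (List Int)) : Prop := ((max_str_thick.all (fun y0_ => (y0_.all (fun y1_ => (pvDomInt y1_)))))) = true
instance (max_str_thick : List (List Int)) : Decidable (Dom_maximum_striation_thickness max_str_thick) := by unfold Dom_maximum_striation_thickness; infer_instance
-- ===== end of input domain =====

-- B replaces A's inner overwrite loop by direct last-element indexing; equivalence is
-- claimed on inputs whose sublists are all nonempty (see Pre_ below).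

-- ===== PORT A =====
-- A's cell starts as the empty list [] and is then overwritten by each int of the sublist;
-- the placeholder [] is encoded as `none`, an overwritten cell as `some item`.  The final
-- `.getD 0` only extracts the int from `some` (under Pre_ every cell was overwritten);
-- it is the type-level extraction needed because the declared return type is List Int.
def maximum_striation_thickness (max_str_thick : List (List Int)) : List Int :=
  ((max_str_thick.foldl
    (fun (st : List (Option Int) × Nat) List1 =>
      -- store_max_str_thick.append([]); for item in List1: store_max_str_thick[i] = item; i = i + 1
      (List1.foldl (fun s item => s.set st.2 (some item)) (st.1 ++ [none]), st.2 + 1))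
    ([], 0)).1).map (fun o => o.getD 0)

-- ===== PORT B =====
-- `L[-1]` is PySem.List.pyGet? L (-1); `.getD 0` extracts the value — under Pre_ the
-- index is always in range (B's Python raises IndexError exactly outside Pre_).
def maximum_striation_thickness_alt (max_str_thick : List (List Int)) : List Int :=
  max_str_thick.map (fun L => (PySem.List.pyGet? L (-1)).getD 0)

-- ===== PRECONDITION & SPEC =====
-- Pre_ excludes inputs containing an empty sublist: there A returns a list containing the
-- Python list [] instead of an int, a value outside the declared return type List Int.
def Pre_maximum_striation_thickness (max_str_thick : List (List Int)) : Prop :=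
  ∀ L ∈ max_str_thick, L ≠ []
instance (max_str_thick : List (List Int)) : Decidable (Pre_maximum_striation_thickness max_str_thick) := by unfold Pre_maximum_striation_thickness; infer_instance
def pvWitness_maximum_striation_thickness : List (List Int) := [[1, 2, 3], [4], [5, 6]]

def Spec_maximum_striation_thickness (max_str_thick : List (List Int)) (out : List Int) : Prop := out = maximum_striation_thickness_alt max_str_thick
instance (max_str_thick : List (List Int)) (out : List Int) : Decidable (Spec_maximum_striation_thickness max_str_thick out) := by unfold Spec_maximum_striation_thickness; infer_instance

-- ===== CLAIM (what is proved, stated in full; the proofs are below) =====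
def Claim_equal_maximum_striation_thickness : Prop := ∀ (max_str_thick : List (List Int)), Dom_maximum_striation_thickness max_str_thick → Pre_maximum_striation_thickness max_str_thick → Spec_maximum_striation_thickness max_str_thick (maximum_striation_thickness max_str_thick)

-- ===== LEMMAS AND PROOFS =====

-- The inner overwrite loop at a fixed index equals a single set of the last element.
theorem pv_inner_loop (L : List Int) (st : List (Option Int)) (i : Nat) :
    L.foldl (fun s item => s.set i (some item)) st =
      match L.getLast? with
      | none => st
      | some v => st.set i (some v) := by
  induction L generalizing st with
  | nil => simp
  | cons a L ih =>
    cases L with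
    | nil => simp
    | cons b L' =>
      rw [List.foldl_cons, ih]
      cases h : (b :: L').getLast? with
      | none => simp at h
      | some v => simp [h, List.set_set]

-- The outer loop starting from (st, st.length) appends one cell per sublist.
theorem pv_outer_loop (xs : List (List Int)) (st : List (Option Int)) :
    (xs.foldl
      (fun (p : List (Option Int) × Nat) List1 =>
        (List1.foldl (fun s item => s.set p.2 (some item)) (p.1 ++ [none]), p.2 + 1))
      (st, st.length)).1 = st ++ xs.map List.getLast? := by
  induction xs generalizing st with
  | nil => simp
  | cons L xs ih =>
    rw [List.foldl_cons]
    have h : (L.foldl (fun s item => s.set st.length (some item)) (st ++ [none]),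
              st.length + 1) =
        ((st ++ [L.getLast?]), (st ++ [L.getLast?]).length) := by
      rw [pv_inner_loop]
      cases hL : L.getLast? <;> simp
    rw [h, ih]
    simp

-- ===== VERDICT (by name: the statement is the Claim_ definition above) =====
theorem maximum_striation_thickness_spec : Claim_equal_maximum_striation_thickness := by
  intro xs _ hpre
  unfold Spec_maximum_striation_thickness maximum_striation_thickness
    maximum_striation_thickness_alt
  have := pv_outer_loop xs []
  simp only [List.length_nil, List.nil_append] at this
  rw [this, List.map_map]
  apply List.map_congr_left
  intro L hL
  have hne : L ≠ [] := hpre L hL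
  simp [PySem.List.pyGet?_neg_one]
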